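-- pv_equiv track=rewrite | github.com/TomCodesStuff/Advent-Of-Code | 2024/code/day_4.py | check_diagonals_up
-- ===== SOURCE A (Python) =====
-- def check_diagonals_up(word_search, i, j, row_len):
--     xmas_count = 0
--     diagonal_text = ""
--     idx = j - 3
--     for row in word_search[i-3:i+1]:
--         if(idx < 0 or idx == row_len): break
--         diagonal_text += row[idx]
--         idx += 1
--     if(diagonal_text[::-1] == "XMAS"): xmas_count += 1
--
--     idx = j + 3
--     diagonal_text = ""
--     for row in word_search[i-3:i+1]:
--         if(idx >= row_len): break
--         diagonal_text += row[idx]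
--         idx -= 1
--     if(diagonal_text[::-1] == "XMAS"): xmas_count += 1
--     return xmas_count
-- ===== SOURCE B (Python) =====
-- def check_diagonals_up(word_search, i, j, row_len):
--     rows = word_search[i-3:i+1]
--     count = 0
--     if (len(rows) == 4 and 3 <= j < row_len
--             and rows[3][j] == 'X' and rows[2][j-1] == 'M'
--             and rows[1][j-2] == 'A' and rows[0][j-3] == 'S'):
--         count += 1
--     if (len(rows) == 4 and j + 3 < row_len
--             and rows[3][j] == 'X' and rows[2][j+1] == 'M'
--             and rows[1][j+2] == 'A' and rows[0][j+3] == 'S'):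
--         count += 1
--     return count
-- ===== Notes on version B (the rewrite author's own statement) =====
-- stated objective: simpler
-- what changed: Replaces the two accumulate-a-string-then-reverse loops by direct four-cell comparisons on the same row slice with explicit index arithmetic and bounds guards; no text is built or reversed.
-- intended difference: When row_len < j-3 (the queried column lies beyond the stated grid width) and the four up-left cells spell S,A,M,X, A's break test idx == row_len never fires, so A scans past the declared width and counts that match (one more than B); B treats columns at or beyond row_len as outside the grid and does not count it, which is the intended reading of row_len as the grid width. — e.g. on check_diagonals_up(["....S", ".....A", "......M", ".......X"], 3, 7, 3): A returns 1, B returns 0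
import Mathlib
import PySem

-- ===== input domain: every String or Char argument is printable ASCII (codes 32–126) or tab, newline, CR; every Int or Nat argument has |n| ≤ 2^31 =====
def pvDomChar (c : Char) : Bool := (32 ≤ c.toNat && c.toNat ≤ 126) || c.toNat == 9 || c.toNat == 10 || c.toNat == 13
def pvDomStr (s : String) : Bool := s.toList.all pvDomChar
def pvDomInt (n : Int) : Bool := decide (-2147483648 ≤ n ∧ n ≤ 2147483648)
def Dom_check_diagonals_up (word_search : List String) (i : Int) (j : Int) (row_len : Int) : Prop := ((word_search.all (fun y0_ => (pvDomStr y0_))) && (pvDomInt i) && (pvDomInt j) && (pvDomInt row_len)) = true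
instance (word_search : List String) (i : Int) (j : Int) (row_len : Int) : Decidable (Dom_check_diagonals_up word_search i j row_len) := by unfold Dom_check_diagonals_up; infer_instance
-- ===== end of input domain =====

-- B replaces A's two accumulate-a-string-then-reverse loops by direct four-cell comparisons on the
-- same row slice with explicit bounds guards (objective: simpler).

-- ===== PORT A =====
-- first for-loop of A: break stops with the text so far; row[idx] out of range = IndexError → none
def cdLoopL (rows : List String) (idx : Int) (row_len : Int) (text : List Char) : Option (List Char) :=
  match rows with
  | [] => some text
  | row :: rs =>
      if idx < 0 ∨ idx = row_len then some text
      else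
        match PySem.Str.pyGet? row idx with
        | none => none
        | some c => cdLoopL rs (idx + 1) row_len (text ++ [c])

-- second for-loop of A
def cdLoopR (rows : List String) (idx : Int) (row_len : Int) (text : List Char) : Option (List Char) :=
  match rows with
  | [] => some text
  | row :: rs =>
      if row_len ≤ idx then some text
      else
        match PySem.Str.pyGet? row idx with
        | none => none
        | some c => cdLoopR rs (idx - 1) row_len (text ++ [c])

def check_diagonals_up (word_search : List String) (i : Int) (j : Int) (row_len : Int) : Int :=
  let rows := PySem.List.slice word_search (some (i - 3)) (some (i + 1))
  let t1 := (cdLoopL rows (j - 3) row_len []).getD []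
  let n1 : Int := if t1.reverse = ['X', 'M', 'A', 'S'] then 1 else 0
  let t2 := (cdLoopR rows (j + 3) row_len []).getD []
  let n2 : Int := if t2.reverse = ['X', 'M', 'A', 'S'] then 1 else 0
  n1 + n2

-- ===== PORT B =====
-- rows[k][c] with Python indexing (none = IndexError)
def bcell (rows : List String) (k : Int) (c : Int) : Option Char :=
  (PySem.List.pyGet? rows k).bind (fun row => PySem.Str.pyGet? row c)

def check_diagonals_up_alt (word_search : List String) (i : Int) (j : Int) (row_len : Int) : Int :=
  let rows := PySem.List.slice word_search (some (i - 3)) (some (i + 1))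
  (if rows.length = 4 ∧ 3 ≤ j ∧ j < row_len
      ∧ bcell rows 3 j = some 'X' ∧ bcell rows 2 (j - 1) = some 'M'
      ∧ bcell rows 1 (j - 2) = some 'A' ∧ bcell rows 0 (j - 3) = some 'S' then 1 else 0)
  + (if rows.length = 4 ∧ j + 3 < row_len
      ∧ bcell rows 3 j = some 'X' ∧ bcell rows 2 (j + 1) = some 'M'
      ∧ bcell rows 1 (j + 2) = some 'A' ∧ bcell rows 0 (j + 3) = some 'S' then 1 else 0)

-- ===== PRECONDITION & SPEC =====
-- Pre_ is exactly the set of inputs on which the Python A returns normally: it only rules out the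
-- inputs on which an executed row access row[idx] raises IndexError (the index is outside the
-- range of valid Python indices for that row).
def Pre_check_diagonals_up (word_search : List String) (i : Int) (j : Int) (row_len : Int) : Prop :=
  let rows := PySem.List.slice word_search (some (i - 3)) (some (i + 1))
  (∀ k, (hk : k < rows.length) →
      3 ≤ j → (row_len < j - 3 ∨ j - 3 + (k : Int) < row_len) →
      j - 3 + (k : Int) < ((rows[k]'hk).toList.length : Int))
  ∧ (∀ k, (hk : k < rows.length) →
      j + 3 < row_len →
      -(((rows[k]'hk).toList.length : Int)) ≤ j + 3 - (k : Int)
        ∧ j + 3 - (k : Int) < ((rows[k]'hk).toList.length : Int))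

instance (word_search : List String) (i : Int) (j : Int) (row_len : Int) : Decidable (Pre_check_diagonals_up word_search i j row_len) := by
  unfold Pre_check_diagonals_up; infer_instance

def pvWitness_check_diagonals_up : List String × Int × Int × Int := (["XMAS"], 0, 0, 1)

-- When row_len < j-3 (the queried column lies beyond the stated grid width) and the four up-left
-- cells spell S,A,M,X, A's break test idx == row_len never fires, so A scans past the declared
-- width and counts that match (one more than B); B treats columns at or beyond row_len as outside
-- the grid and does not count it, which is the intended reading of row_len as the grid width.
-- the grid cell at row r (Python indexing), column c
def dUp (ws : List String) (r c : Int) : Option Char :=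
  (PySem.List.pyGet? ws r).bind (fun s => s.toList[c.toNat]?)

def D_check_diagonals_up (word_search : List String) (i : Int) (j : Int) (row_len : Int) : Prop :=
  (3 ≤ i ∨ i < -1) ∧ 3 ≤ j ∧ row_len < j - 3
    ∧ (List.range 4).map (fun (k : Nat) => dUp word_search (i - 3 + k) (j - 3 + k))
      = [some 'S', some 'A', some 'M', some 'X']

instance (word_search : List String) (i : Int) (j : Int) (row_len : Int) : Decidable (D_check_diagonals_up word_search i j row_len) := by
  unfold D_check_diagonals_up; infer_instance

def Spec_check_diagonals_up (word_search : List String) (i : Int) (j : Int) (row_len : Int) (out : Int) : Prop := ¬ D_check_diagonals_up word_search i j row_len → out = check_diagonals_up_alt word_search i j row_len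
instance (word_search : List String) (i : Int) (j : Int) (row_len : Int) (out : Int) : Decidable (Spec_check_diagonals_up word_search i j row_len out) := by unfold Spec_check_diagonals_up; infer_instance

def pvDiffWitness_check_diagonals_up : List String × Int × Int × Int :=
  (["....S", ".....A", "......M", ".......X"], 3, 7, 3)
def pvDiffWitnessOut_check_diagonals_up : Int × Int := (1, 0)

-- ===== CLAIM (what is proved, stated in full; the proofs are below) =====
def Claim_unchanged_check_diagonals_up : Prop := ∀ (word_search : List String) (i : Int) (j : Int) (row_len : Int), Dom_check_diagonals_up word_search i j row_len → Pre_check_diagonals_up word_search i j row_len → Spec_check_diagonals_up word_search i j row_len (check_diagonals_up word_search i j row_len)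
def Claim_changed_check_diagonals_up : Prop := Dom_check_diagonals_up (pvDiffWitness_check_diagonals_up.1) (pvDiffWitness_check_diagonals_up.2.1) (pvDiffWitness_check_diagonals_up.2.2.1) (pvDiffWitness_check_diagonals_up.2.2.2) ∧ Pre_check_diagonals_up (pvDiffWitness_check_diagonals_up.1) (pvDiffWitness_check_diagonals_up.2.1) (pvDiffWitness_check_diagonals_up.2.2.1) (pvDiffWitness_check_diagonals_up.2.2.2) ∧ D_check_diagonals_up (pvDiffWitness_check_diagonals_up.1) (pvDiffWitness_check_diagonals_up.2.1) (pvDiffWitness_check_diagonals_up.2.2.1) (pvDiffWitness_check_diagonals_up.2.2.2) ∧ check_diagonals_up (pvDiffWitness_check_diagonals_up.1) (pvDiffWitness_check_diagonals_up.2.1) (pvDiffWitness_check_diagonals_up.2.2.1) (pvDiffWitness_check_diagonals_up.2.2.2) = pvDiffWitnessOut_check_diagonals_up.1 ∧ check_diagonals_up_alt (pvDiffWitness_check_diagonals_up.1) (pvDiffWitness_check_diagonals_up.2.1) (pvDiffWitness_check_diagonals_up.2.2.1) (pvDiffWitness_check_diagonals_up.2.2.2) = pvDiffWitnessOut_check_diagonals_up.2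 ∧ pvDiffWitnessOut_check_diagonals_up.1 ≠ pvDiffWitnessOut_check_diagonals_up.2
def Claim_exact_check_diagonals_up : Prop := ∀ (word_search : List String) (i : Int) (j : Int) (row_len : Int), Dom_check_diagonals_up word_search i j row_len → Pre_check_diagonals_up word_search i j row_len → D_check_diagonals_up word_search i j row_len → check_diagonals_up word_search i j row_len ≠ check_diagonals_up_alt word_search i j row_len

-- ===== LEMMAS AND PROOFS =====

lemma cdLoopL_getD_len (rows : List String) (idx row_len : Int) (text : List Char) :
    ((cdLoopL rows idx row_len text).getD []).length ≤ text.length + rows.length := by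
  induction rows generalizing idx text with
  | nil => simp [cdLoopL]
  | cons row rs ih =>
      simp only [cdLoopL]
      split
      · simp
      · cases h : PySem.Str.pyGet? row idx with
        | none => simp
        | some c =>
            have := ih (idx + 1) (text ++ [c])
            simp only [List.length_append, List.length_cons, List.length_nil] at this ⊢
            omega

lemma cdLoopR_getD_len (rows : List String) (idx row_len : Int) (text : List Char) :
    ((cdLoopR rows idx row_len text).getD []).length ≤ text.length + rows.length := by
  induction rows generalizing idx text with
  | nil => simp [cdLoopR]
  | cons row rs ih =>
      simp only [cdLoopR]
      split
      · simp
      · cases h : PySem.Str.pyGet? row idx with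
        | none => simp
        | some c =>
            have := ih (idx - 1) (text ++ [c])
            simp only [List.length_append, List.length_cons, List.length_nil] at this ⊢
            omega

-- if the first loop's break condition fires within the rows, the collected text stays short
lemma cdLoopL_break_len (rows : List String) (idx row_len : Int) (text : List Char) (m : Nat)
    (hm : m < rows.length) (hbr : idx + m < 0 ∨ idx + m = row_len) :
    ((cdLoopL rows idx row_len text).getD []).length ≤ text.length + m := by
  induction rows generalizing idx text m with
  | nil => simp at hm
  | cons row rs ih =>
      simp only [cdLoopL]
      split
      · simp
      · rename_i hg
        have hm0 : m ≠ 0 := by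
          rintro rfl
          simp only [Nat.cast_zero, Int.add_zero] at hbr
          exact hg hbr
        cases h : PySem.Str.pyGet? row idx with
        | none => simp
        | some c =>
            have := ih (idx + 1) (text ++ [c]) (m - 1)
              (by simp only [List.length_cons] at hm; omega)
              (by
                have : idx + 1 + ((m - 1 : Nat) : Int) = idx + m := by omega
                omega)
            simp only [List.length_append, List.length_cons, List.length_nil] at this ⊢
            omega

lemma strGet_of_nonneg (s : String) (c : Int) (h0 : 0 ≤ c) :
    PySem.Str.pyGet? s c = s.toList[c.toNat]? := by
  conv_lhs => rw [show c = ((c.toNat : Nat) : Int) from (Int.toNat_of_nonneg h0).symm]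
  exact PySem.Str.pyGet?_natCast s c.toNat

lemma cdLoopL_step (row : String) (rs : List String) (idx row_len : Int) (text : List Char)
    (c : Char) (h1 : 0 ≤ idx) (h2 : idx ≠ row_len) (h3 : PySem.Str.pyGet? row idx = some c) :
    cdLoopL (row :: rs) idx row_len text = cdLoopL rs (idx + 1) row_len (text ++ [c]) := by
  simp only [cdLoopL, h3]
  rw [if_neg (by omega)]

lemma cdLoopR_step (row : String) (rs : List String) (idx row_len : Int) (text : List Char)
    (c : Char) (h1 : idx < row_len) (h3 : PySem.Str.pyGet? row idx = some c) :
    cdLoopR (row :: rs) idx row_len text = cdLoopR rs (idx - 1) row_len (text ++ [c]) := by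
  simp only [cdLoopR, h3]
  rw [if_neg (by omega)]

lemma strGet_total (s : String) (c : Int) (h0 : -(s.toList.length : Int) ≤ c)
    (h1 : c < (s.toList.length : Int)) : ∃ ch, PySem.Str.pyGet? s c = some ch := by
  cases h : PySem.Str.pyGet? s c with
  | some ch => exact ⟨ch, rfl⟩
  | none =>
      exfalso
      have h' : PySem.List.pyGet? s.toList c = none := h
      rw [PySem.List.pyGet?_eq_none_iff] at h'
      have hl : s.toList.length = s.length := by simp
      exact h' (by simp [PySem.Raise.InRange]; omega)

lemma slice4_len (ws : List String) (i : Int) :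
    (PySem.List.slice ws (some (i - 3)) (some (i + 1))).length ≤ 4 := by
  rw [PySem.List.length_slice]
  have h1 : PySem.List.clampIdx ws.length (i + 1) ≤ PySem.List.clampIdx ws.length (i - 3) + 4 := by
    simp only [PySem.List.clampIdx]
    split_ifs <;> omega
  omega

-- proof-side abbreviations for the clamped slice bounds of A's row window
def dLo (n : Nat) (i : Int) : Nat := PySem.List.clampIdx n (i - 3)
def dHi (n : Nat) (i : Int) : Nat := PySem.List.clampIdx n (i + 1)

lemma pyGet?_eq_some_iff' (ws : List String) (t : Int) (r : String) :
    PySem.List.pyGet? ws t = some r ↔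
      (0 ≤ t ∧ ws[t.toNat]? = some r)
        ∨ (t < 0 ∧ 0 ≤ t + ws.length ∧ ws[(t + ws.length).toNat]? = some r) := by
  unfold PySem.List.pyGet? PySem.List.pyIdx?
  split_ifs with h1 h2
  all_goals simp_all
  all_goals try omega
  rw [show ws.length - (-t).toNat = (t + ws.length).toNat from by omega]
  rw [List.getElem?_eq_some_iff, List.getElem?_eq_some_iff]
  constructor
  · rintro ⟨h, e⟩
    exact Or.inr ⟨by omega, ⟨by omega, e⟩⟩
  · rintro (⟨h0, _⟩ | ⟨_, h, e⟩)
    · omega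
    · exact ⟨by omega, e⟩

lemma dHi_le (n : Nat) (i : Int) : dHi n i ≤ n ∧ dHi n i ≤ dLo n i + 4 := by
  unfold dHi dLo PySem.List.clampIdx; split_ifs <;> omega

-- A's four-row slice, read off from the clamped indices D_ is stated with
lemma slice_eq_four_iff (ws : List String) (i : Int) (r0 r1 r2 r3 : String) :
    PySem.List.slice ws (some (i - 3)) (some (i + 1)) = [r0, r1, r2, r3] ↔
      (dHi ws.length i = dLo ws.length i + 4
        ∧ ws[dLo ws.length i]? = some r0 ∧ ws[dLo ws.length i + 1]? = some r1
        ∧ ws[dLo ws.length i + 2]? = some r2 ∧ ws[dLo ws.length i + 3]? = some r3) := by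
  have hdef : PySem.List.slice ws (some (i - 3)) (some (i + 1))
      = (ws.drop (dLo ws.length i)).take (dHi ws.length i - dLo ws.length i) := rfl
  have hcl := dHi_le ws.length i
  constructor
  · intro hr
    rw [hdef] at hr
    have hlen := congrArg List.length hr
    simp only [List.length_take, List.length_drop, List.length_cons, List.length_nil] at hlen
    have h4 : dHi ws.length i = dLo ws.length i + 4 ∧ dLo ws.length i + 4 ≤ ws.length := by omega
    have e0 := congrArg (fun l => l[0]?) hr
    have e1 := congrArg (fun l => l[1]?) hr
    have e2 := congrArg (fun l => l[2]?) hr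
    have e3 := congrArg (fun l => l[3]?) hr
    simp only [List.getElem?_take, List.getElem?_drop] at e0 e1 e2 e3
    rw [if_pos (by omega)] at e0
    rw [if_pos (by omega)] at e1
    rw [if_pos (by omega)] at e2
    rw [if_pos (by omega)] at e3
    simp at e0 e1 e2 e3
    exact ⟨h4.1, e0, e1, e2, e3⟩
  · rintro ⟨h4, w0, w1, w2, w3⟩
    have hn : dLo ws.length i + 4 ≤ ws.length := by
      have := List.getElem?_eq_some_iff.mp w3
      omega
    rw [hdef, h4]
    apply List.ext_getElem?
    intro k
    match k with
    | 0 => simp only [List.getElem?_take, List.getElem?_drop]; rw [if_pos (by omega)]; simpa using w0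
    | 1 => simp only [List.getElem?_take, List.getElem?_drop]; rw [if_pos (by omega)]; simpa using w1
    | 2 => simp only [List.getElem?_take, List.getElem?_drop]; rw [if_pos (by omega)]; simpa using w2
    | 3 => simp only [List.getElem?_take, List.getElem?_drop]; rw [if_pos (by omega)]; simpa using w3
    | (k+4) =>
        rw [List.getElem?_eq_none (by simp), List.getElem?_eq_none (by simp)]

-- A's four-row window, read off as Python row accesses ws[i-3], …, ws[i]
lemma slice_four_pyGet (ws : List String) (i : Int) (r0 r1 r2 r3 : String) :
    PySem.List.slice ws (some (i - 3)) (some (i + 1)) = [r0, r1, r2, r3] ↔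
      ((3 ≤ i ∨ i < -1)
        ∧ PySem.List.pyGet? ws (i - 3) = some r0 ∧ PySem.List.pyGet? ws (i - 2) = some r1
        ∧ PySem.List.pyGet? ws (i - 1) = some r2 ∧ PySem.List.pyGet? ws i = some r3) := by
  rw [slice_eq_four_iff]
  constructor
  · rintro ⟨h4, w0, w1, w2, w3⟩
    have hn : dLo ws.length i + 4 ≤ ws.length := by
      have h := (List.getElem?_eq_some_iff.mp w3).1
      omega
    have hcl : (3 ≤ i ∧ dLo ws.length i = (i - 3).toNat)
        ∨ (i < -1 ∧ (dLo ws.length i : Int) = i - 3 + ws.length) := by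
      simp only [dLo, dHi, PySem.List.clampIdx] at h4 hn ⊢
      split_ifs at h4 hn ⊢ <;> omega
    rcases hcl with ⟨hi, hlo⟩ | ⟨hi, hlo⟩
    · refine ⟨Or.inl hi, ?_, ?_, ?_, ?_⟩ <;> rw [pyGet?_eq_some_iff']
      · exact Or.inl ⟨by omega, by rw [show (i - 3).toNat = dLo ws.length i from by omega]; exact w0⟩
      · exact Or.inl ⟨by omega, by rw [show (i - 2).toNat = dLo ws.length i + 1 from by omega]; exact w1⟩
      · exact Or.inl ⟨by omega, by rw [show (i - 1).toNat = dLo ws.length i + 2 from by omega]; exact w2⟩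
      · exact Or.inl ⟨by omega, by rw [show i.toNat = dLo ws.length i + 3 from by omega]; exact w3⟩
    · refine ⟨Or.inr hi, ?_, ?_, ?_, ?_⟩ <;> rw [pyGet?_eq_some_iff']
      · exact Or.inr ⟨by omega, by omega,
          by rw [show (i - 3 + ws.length).toNat = dLo ws.length i from by omega]; exact w0⟩
      · exact Or.inr ⟨by omega, by omega,
          by rw [show (i - 2 + ws.length).toNat = dLo ws.length i + 1 from by omega]; exact w1⟩
      · exact Or.inr ⟨by omega, by omega,
          by rw [show (i - 1 + ws.length).toNat = dLo ws.length i + 2 from by omega]; exact w2⟩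
      · exact Or.inr ⟨by omega, by omega,
          by rw [show (i + ws.length).toNat = dLo ws.length i + 3 from by omega]; exact w3⟩
  · rintro ⟨hsign, g0, g1, g2, g3⟩
    rw [pyGet?_eq_some_iff'] at g0 g1 g2 g3
    rcases hsign with hi | hi
    · rcases g0 with ⟨_, e0⟩ | ⟨h, _⟩; swap; · omega
      rcases g1 with ⟨_, e1⟩ | ⟨h, _⟩; swap; · omega
      rcases g2 with ⟨_, e2⟩ | ⟨h, _⟩; swap; · omega
      rcases g3 with ⟨_, e3⟩ | ⟨h, _⟩; swap; · omega
      have hb : i.toNat < ws.length := (List.getElem?_eq_some_iff.mp e3).1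
      have hlo : dLo ws.length i = (i - 3).toNat ∧ dHi ws.length i = (i + 1).toNat := by
        unfold dLo dHi PySem.List.clampIdx
        split_ifs <;> omega
      refine ⟨by omega, ?_, ?_, ?_, ?_⟩
      · rw [show dLo ws.length i = (i - 3).toNat from hlo.1]; exact e0
      · rw [show dLo ws.length i + 1 = (i - 2).toNat from by omega]; exact e1
      · rw [show dLo ws.length i + 2 = (i - 1).toNat from by omega]; exact e2
      · rw [show dLo ws.length i + 3 = i.toNat from by omega]; exact e3
    · rcases g0 with ⟨h, _⟩ | ⟨_, hge0, e0⟩; · omega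
      rcases g1 with ⟨h, _⟩ | ⟨_, _, e1⟩; · omega
      rcases g2 with ⟨h, _⟩ | ⟨_, _, e2⟩; · omega
      rcases g3 with ⟨h, _⟩ | ⟨_, _, e3⟩; · omega
      have hlo : (dLo ws.length i : Int) = i - 3 + ws.length
          ∧ (dHi ws.length i : Int) = i + 1 + ws.length := by
        unfold dLo dHi PySem.List.clampIdx
        split_ifs <;> omega
      refine ⟨by omega, ?_, ?_, ?_, ?_⟩
      · rw [show dLo ws.length i = (i - 3 + ws.length).toNat from by omega]; exact e0
      · rw [show dLo ws.length i + 1 = (i - 2 + ws.length).toNat from by omega]; exact e1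
      · rw [show dLo ws.length i + 2 = (i - 1 + ws.length).toNat from by omega]; exact e2
      · rw [show dLo ws.length i + 3 = (i + ws.length).toNat from by omega]; exact e3

lemma dUp_eq_some (ws : List String) (r c : Int) (x : Char) :
    dUp ws r c = some x ↔
      ∃ s, PySem.List.pyGet? ws r = some s ∧ s.toList[c.toNat]? = some x := by
  simp [dUp, Option.bind_eq_some_iff]

-- full up-left scan over four rows when no break fires (0 ≤ j-3 and row_len outside {j-3..j})
lemma cdLoopL_full (r0 r1 r2 r3 : String) (j rl : Int) (c0 c1 c2 c3 : Char)
    (hj : 3 ≤ j) (hout : rl < j - 3 ∨ j < rl)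
    (g0 : PySem.Str.pyGet? r0 (j - 3) = some c0) (g1 : PySem.Str.pyGet? r1 (j - 2) = some c1)
    (g2 : PySem.Str.pyGet? r2 (j - 1) = some c2) (g3 : PySem.Str.pyGet? r3 j = some c3) :
    cdLoopL [r0, r1, r2, r3] (j - 3) rl [] = some [c0, c1, c2, c3] := by
  simp only [List.nil_append, List.cons_append,
      cdLoopL_step r0 [r1, r2, r3] (j - 3) rl [] c0 (by omega) (by omega) g0,
      show j - 3 + 1 = j - 2 from by ring,
      cdLoopL_step r1 [r2, r3] (j - 2) rl [c0] c1 (by omega) (by omega) g1,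
      show j - 2 + 1 = j - 1 from by ring,
      cdLoopL_step r2 [r3] (j - 1) rl [c0, c1] c2 (by omega) (by omega) g2,
      show j - 1 + 1 = j from by ring,
      cdLoopL_step r3 [] j rl [c0, c1, c2] c3 (by omega) (by omega) g3]
  rfl

-- the whole right-diagonal contribution of A equals B's, given that A's reads do not raise
lemma right_eq (r0 r1 r2 r3 : String) (j rl : Int)
    (p2 : ∀ k, (hk : k < ([r0, r1, r2, r3] : List String).length) →
        j + 3 < rl →
        -(((([r0, r1, r2, r3] : List String)[k]'hk).toList.length : Int)) ≤ j + 3 - (k : Int)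
          ∧ j + 3 - (k : Int) < ((([r0, r1, r2, r3] : List String)[k]'hk).toList.length : Int)) :
    (if ((cdLoopR [r0, r1, r2, r3] (j + 3) rl []).getD []).reverse = ['X', 'M', 'A', 'S']
        then (1 : Int) else 0)
    = (if ([r0, r1, r2, r3] : List String).length = 4 ∧ j + 3 < rl
          ∧ PySem.Str.pyGet? r3 j = some 'X' ∧ PySem.Str.pyGet? r2 (j + 1) = some 'M'
          ∧ PySem.Str.pyGet? r1 (j + 2) = some 'A' ∧ PySem.Str.pyGet? r0 (j + 3) = some 'S'
        then (1 : Int) else 0) := by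
  simp only [List.length_cons, List.length_nil] at p2 ⊢
  by_cases hb : j + 3 < rl
  · obtain ⟨d0, gd0⟩ : ∃ c, PySem.Str.pyGet? r0 (j + 3) = some c := by
      have := p2 0 (by omega) hb
      exact strGet_total _ _ (by simp at this ⊢; omega) (by simp at this ⊢; omega)
    obtain ⟨d1, gd1⟩ : ∃ c, PySem.Str.pyGet? r1 (j + 2) = some c := by
      have := p2 1 (by omega) hb
      exact strGet_total _ _ (by simp at this ⊢; omega) (by simp at this ⊢; omega)
    obtain ⟨d2, gd2⟩ : ∃ c, PySem.Str.pyGet? r2 (j + 1) = some c := by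
      have := p2 2 (by omega) hb
      exact strGet_total _ _ (by simp at this ⊢; omega) (by simp at this ⊢; omega)
    obtain ⟨d3, gd3⟩ : ∃ c, PySem.Str.pyGet? r3 j = some c := by
      have := p2 3 (by omega) hb
      exact strGet_total _ _ (by simp at this ⊢; omega) (by simp at this ⊢; omega)
    simp only [List.nil_append, List.cons_append,
        cdLoopR_step r0 [r1, r2, r3] (j + 3) rl [] d0 (by omega) gd0,
        show j + 3 - 1 = j + 2 from by ring,
        cdLoopR_step r1 [r2, r3] (j + 2) rl [d0] d1 (by omega) gd1,
        show j + 2 - 1 = j + 1 from by ring,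
        cdLoopR_step r2 [r3] (j + 1) rl [d0, d1] d2 (by omega) gd2,
        show j + 1 - 1 = j from by ring,
        cdLoopR_step r3 [] j rl [d0, d1, d2] d3 (by omega) gd3]
    simp only [cdLoopR, Option.getD_some, gd0, gd1, gd2, gd3]
    exact if_congr (by simp [hb]) rfl rfl
  · rw [show cdLoopR [r0, r1, r2, r3] (j + 3) rl [] = some [] from by
        simp only [cdLoopR]; rw [if_pos (by omega)]]
    rw [if_neg (by simp), if_neg (fun h => hb h.2.1)]

-- ===== VERDICT (by name: the statements are the Claim_ definitions above) =====
theorem check_diagonals_up_spec : Claim_unchanged_check_diagonals_up := by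
  intro ws i j row_len _hdom hpre hnd
  unfold Pre_check_diagonals_up at hpre
  obtain ⟨p1, p2⟩ := hpre
  unfold check_diagonals_up check_diagonals_up_alt
  simp only []
  have h4 := slice4_len ws i
  by_cases hR : (PySem.List.slice ws (some (i - 3)) (some (i + 1))).length = 4
  swap
  · -- fewer than four rows: no match possible on either side
    have k1 := cdLoopL_getD_len (PySem.List.slice ws (some (i - 3)) (some (i + 1))) (j - 3) row_len []
    have k2 := cdLoopR_getD_len (PySem.List.slice ws (some (i - 3)) (some (i + 1))) (j + 3) row_len []
    rw [if_neg (fun h => by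
          have := congrArg List.length h
          simp only [List.length_reverse, List.length_cons, List.length_nil] at this k1
          omega),
        if_neg (fun h => by
          have := congrArg List.length h
          simp only [List.length_reverse, List.length_cons, List.length_nil] at this k2
          omega),
        if_neg (fun h => hR h.1), if_neg (fun h => hR h.1)]
  · obtain ⟨r0, r1, r2, r3, hr⟩ :
        ∃ a b c d, PySem.List.slice ws (some (i - 3)) (some (i + 1)) = [a, b, c, d] := by
      rcases hl : PySem.List.slice ws (some (i - 3)) (some (i + 1)) with
        _ | ⟨a, (_ | ⟨b, (_ | ⟨c, (_ | ⟨d, (_ | ⟨e, t⟩)⟩)⟩)⟩)⟩ <;>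
        rw [hl] at hR <;> simp at hR ⊢
    simp only [hr] at p1 p2
    unfold D_check_diagonals_up at hnd
    rw [hr]
    simp only [List.length_cons, List.length_nil] at p1
    have b3 : ∀ c, bcell [r0, r1, r2, r3] 3 c = PySem.Str.pyGet? r3 c := by
      intro c; simp [bcell, PySem.List.pyGet?, PySem.List.pyIdx?]
    have b2 : ∀ c, bcell [r0, r1, r2, r3] 2 c = PySem.Str.pyGet? r2 c := by
      intro c; simp [bcell, PySem.List.pyGet?, PySem.List.pyIdx?]
    have b1 : ∀ c, bcell [r0, r1, r2, r3] 1 c = PySem.Str.pyGet? r1 c := by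
      intro c; simp [bcell, PySem.List.pyGet?, PySem.List.pyIdx?]
    have b0 : ∀ c, bcell [r0, r1, r2, r3] 0 c = PySem.Str.pyGet? r0 c := by
      intro c; simp [bcell, PySem.List.pyGet?, PySem.List.pyIdx?]
    simp only [b0, b1, b2, b3, List.length_cons, List.length_nil]
    have hright := right_eq r0 r1 r2 r3 j row_len p2
    simp only [List.length_cons, List.length_nil] at hright
    rw [hright]
    congr 1
    -- up-left diagonal
    by_cases hj : 3 ≤ j
    · by_cases hjr : j < row_len
      · -- all four cells are read; Pre_ makes every access succeed
        obtain ⟨c0, g0⟩ : ∃ c, PySem.Str.pyGet? r0 (j - 3) = some c := by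
          have := p1 0 (by omega) hj (by omega)
          rw [strGet_of_nonneg _ _ (by omega)]
          exact ⟨_, List.getElem?_eq_getElem (by simp at this ⊢; omega)⟩
        obtain ⟨c1, g1⟩ : ∃ c, PySem.Str.pyGet? r1 (j - 2) = some c := by
          have := p1 1 (by omega) hj (by omega)
          rw [strGet_of_nonneg _ _ (by omega)]
          exact ⟨_, List.getElem?_eq_getElem (by simp at this ⊢; omega)⟩
        obtain ⟨c2, g2⟩ : ∃ c, PySem.Str.pyGet? r2 (j - 1) = some c := by
          have := p1 2 (by omega) hj (by omega)
          rw [strGet_of_nonneg _ _ (by omega)]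
          exact ⟨_, List.getElem?_eq_getElem (by simp at this ⊢; omega)⟩
        obtain ⟨c3, g3⟩ : ∃ c, PySem.Str.pyGet? r3 j = some c := by
          have := p1 3 (by omega) hj (by omega)
          rw [strGet_of_nonneg _ _ (by omega)]
          exact ⟨_, List.getElem?_eq_getElem (by simp at this ⊢; omega)⟩
        rw [cdLoopL_full r0 r1 r2 r3 j row_len c0 c1 c2 c3 hj (Or.inr hjr) g0 g1 g2 g3]
        simp only [Option.getD_some, g0, g1, g2, g3]
        exact if_congr (by simp [hj, hjr]) rfl rfl
      · by_cases hlow : row_len < j - 3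
        · -- A scans past the declared width; ¬D_ says the cells do not spell S,A,M,X
          obtain ⟨c0, g0⟩ : ∃ c, PySem.Str.pyGet? r0 (j - 3) = some c := by
            have := p1 0 (by omega) hj (Or.inl hlow)
            rw [strGet_of_nonneg _ _ (by omega)]
            exact ⟨_, List.getElem?_eq_getElem (by simp at this ⊢; omega)⟩
          obtain ⟨c1, g1⟩ : ∃ c, PySem.Str.pyGet? r1 (j - 2) = some c := by
            have := p1 1 (by omega) hj (Or.inl hlow)
            rw [strGet_of_nonneg _ _ (by omega)]
            exact ⟨_, List.getElem?_eq_getElem (by simp at this ⊢; omega)⟩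
          obtain ⟨c2, g2⟩ : ∃ c, PySem.Str.pyGet? r2 (j - 1) = some c := by
            have := p1 2 (by omega) hj (Or.inl hlow)
            rw [strGet_of_nonneg _ _ (by omega)]
            exact ⟨_, List.getElem?_eq_getElem (by simp at this ⊢; omega)⟩
          obtain ⟨c3, g3⟩ : ∃ c, PySem.Str.pyGet? r3 j = some c := by
            have := p1 3 (by omega) hj (Or.inl hlow)
            rw [strGet_of_nonneg _ _ (by omega)]
            exact ⟨_, List.getElem?_eq_getElem (by simp at this ⊢; omega)⟩
          rw [cdLoopL_full r0 r1 r2 r3 j row_len c0 c1 c2 c3 hj (Or.inl hlow) g0 g1 g2 g3]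
          simp only [Option.getD_some]
          rw [if_neg (by
                intro hsp
                apply hnd
                have e0 := g0; have e1 := g1; have e2 := g2; have e3 := g3
                rw [strGet_of_nonneg _ _ (by omega)] at e0 e3
                rw [strGet_of_nonneg _ _ (by omega)] at e1
                rw [strGet_of_nonneg _ _ (by omega)] at e2
                obtain ⟨rfl, rfl, rfl, rfl⟩ :
                    c3 = 'X' ∧ c2 = 'M' ∧ c1 = 'A' ∧ c0 = 'S' := by simpa using hsp
                obtain ⟨hsign, q0, q1, q2, q3⟩ := (slice_four_pyGet ws i r0 r1 r2 r3).mp hr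
                refine ⟨hsign, hj, hlow, ?_⟩
                rw [show (List.range 4) = [0, 1, 2, 3] from rfl]
                simp [dUp, q0, q1, q2, q3, e0, e1, e3,
                  show i - 3 + (1 : Int) = i - 2 from by ring,
                  show i - 3 + (2 : Int) = i - 1 from by ring,
                  show i - 3 + (3 : Int) = i from by ring,
                  show j - 3 + (1 : Int) = j - 2 from by ring,
                  show j - 3 + (2 : Int) = j - 1 from by ring,
                  show j - 3 + (3 : Int) = j from by ring]
                rw [show j.toNat - 1 = (j - 1).toNat from by omega]
                exact e2),
              if_neg (fun h => hjr h.2.2.1)]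
        · -- break on idx == row_len fires within the four rows: no match
          have hb := cdLoopL_break_len [r0, r1, r2, r3] (j - 3) row_len []
            (row_len - (j - 3)).toNat (by simp only [List.length_cons, List.length_nil]; omega)
            (by omega)
          rw [if_neg (fun h => by
                have := congrArg List.length h
                simp only [List.length_reverse, List.length_cons, List.length_nil] at this hb
                omega),
              if_neg (fun h => hjr h.2.2.1)]
    · -- j < 3: the first loop breaks immediately
      have hb := cdLoopL_break_len [r0, r1, r2, r3] (j - 3) row_len [] 0
        (by simp only [List.length_cons, List.length_nil]; omega) (by omega)
      rw [if_neg (fun h => by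
            have := congrArg List.length h
            simp only [List.length_reverse, List.length_cons, List.length_nil] at this hb
            omega),
          if_neg (fun h => hj h.2.1)]

theorem check_diagonals_up_changed : Claim_changed_check_diagonals_up := by
  unfold Claim_changed_check_diagonals_up; decide

theorem check_diagonals_up_tight : Claim_exact_check_diagonals_up := by
  intro ws i j row_len _hdom hpre hd
  unfold Pre_check_diagonals_up at hpre
  obtain ⟨p1, p2⟩ := hpre
  unfold D_check_diagonals_up at hd
  unfold check_diagonals_up check_diagonals_up_alt
  simp only []
  obtain ⟨hsign, hj, hlow, hcells⟩ := hd
  rw [show (List.range 4) = [0, 1, 2, 3] from rfl] at hcells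
  simp only [List.map_cons, List.map_nil, List.cons.injEq, and_true] at hcells
  simp only [Nat.cast_zero, Nat.cast_one, Nat.cast_ofNat, add_zero,
    show i - 3 + (1 : Int) = i - 2 from by ring,
    show i - 3 + (2 : Int) = i - 1 from by ring,
    show i - 3 + (3 : Int) = i from by ring,
    show j - 3 + (1 : Int) = j - 2 from by ring,
    show j - 3 + (2 : Int) = j - 1 from by ring,
    show j - 3 + (3 : Int) = j from by ring] at hcells
  obtain ⟨hc0, hc1, hc2, hc3⟩ := hcells
  rw [dUp_eq_some] at hc0 hc1 hc2 hc3
  obtain ⟨r0, w0, e0⟩ := hc0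
  obtain ⟨r1, w1, e1⟩ := hc1
  obtain ⟨r2, w2, e2⟩ := hc2
  obtain ⟨r3, w3, e3⟩ := hc3
  have hr : PySem.List.slice ws (some (i - 3)) (some (i + 1)) = [r0, r1, r2, r3] :=
    (slice_four_pyGet ws i r0 r1 r2 r3).mpr ⟨hsign, w0, w1, w2, w3⟩
  simp only [hr] at p1 p2
  rw [hr]
  simp only [List.length_cons, List.length_nil] at p1
  have g0 : PySem.Str.pyGet? r0 (j - 3) = some 'S' := by
    rw [strGet_of_nonneg _ _ (by omega)]; exact e0
  have g1 : PySem.Str.pyGet? r1 (j - 2) = some 'A' := by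
    rw [strGet_of_nonneg _ _ (by omega)]; exact e1
  have g2 : PySem.Str.pyGet? r2 (j - 1) = some 'M' := by
    rw [strGet_of_nonneg _ _ (by omega)]; exact e2
  have g3 : PySem.Str.pyGet? r3 j = some 'X' := by
    rw [strGet_of_nonneg _ _ (by omega)]; exact e3
  -- A's left contribution is 1
  rw [cdLoopL_full r0 r1 r2 r3 j row_len 'S' 'A' 'M' 'X' hj (Or.inl hlow) g0 g1 g2 g3]
  -- B's left contribution is 0 (j < row_len fails since row_len < j - 3 ≤ j)
  have hright := right_eq r0 r1 r2 r3 j row_len p2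
  have b3 : ∀ c, bcell [r0, r1, r2, r3] 3 c = PySem.Str.pyGet? r3 c := by
    intro c; simp [bcell, PySem.List.pyGet?, PySem.List.pyIdx?]
  have b2 : ∀ c, bcell [r0, r1, r2, r3] 2 c = PySem.Str.pyGet? r2 c := by
    intro c; simp [bcell, PySem.List.pyGet?, PySem.List.pyIdx?]
  have b1 : ∀ c, bcell [r0, r1, r2, r3] 1 c = PySem.Str.pyGet? r1 c := by
    intro c; simp [bcell, PySem.List.pyGet?, PySem.List.pyIdx?]
  have b0 : ∀ c, bcell [r0, r1, r2, r3] 0 c = PySem.Str.pyGet? r0 c := by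
    intro c; simp [bcell, PySem.List.pyGet?, PySem.List.pyIdx?]
  simp only [b0, b1, b2, b3, List.length_cons, List.length_nil] at hright ⊢
  rw [hright]
  rw [if_pos (show (((some (['S', 'A', 'M', 'X'] : List Char)).getD []).reverse
      = ['X', 'M', 'A', 'S']) from by decide)]
  have hBL : ¬(True ∧ 3 ≤ j ∧ j < row_len
      ∧ PySem.Str.pyGet? r3 j = some 'X' ∧ PySem.Str.pyGet? r2 (j - 1) = some 'M'
      ∧ PySem.Str.pyGet? r1 (j - 2) = some 'A' ∧ PySem.Str.pyGet? r0 (j - 3) = some 'S') :=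
    fun h => absurd h.2.2.1 (by omega)
  rw [if_neg hBL]
  omega
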